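-- pv_equiv track=rewrite | github.com/proximious/rit_coursework | year1/CS141/week05/lab05/jertle.py | locate_end_of_arg
-- ===== SOURCE A (Python) =====
-- def locate_end_of_arg(line):
--     """
--     locates the end of the argument for the line of jertle code
--     always finds the index of the opening and closing curly bracket
--     :param line:
--     :return:
--     """
--     start = None
--     end = None
--
--     for c in range(0, len(line)):
--         if line[c] == "{":
--             start = c
--         if line[c] == "}":
--             end = c
--             break
--
--     # creates a tuple that returns the indexes of opening and closing brackets
--     return start, end
-- ===== SOURCE B (Python) =====
-- def locate_end_of_arg(line):
--     end = line.find('}')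
--     if end == -1:
--         start = line.rfind('{')
--         return (None if start == -1 else start), None
--     start = line.rfind('{', 0, end)
--     return (None if start == -1 else start), end
-- ===== Notes on version B (the rewrite author's own statement) =====
-- stated objective: faster
-- what changed: Replaces A's Python-level indexed scan-with-break by a locate-then-search decomposition: find the first closing brace with str.find, then the last opening brace before it (or in the whole line if there is none) with str.rfind, mapping the -1 sentinel to None.
import Mathlib
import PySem

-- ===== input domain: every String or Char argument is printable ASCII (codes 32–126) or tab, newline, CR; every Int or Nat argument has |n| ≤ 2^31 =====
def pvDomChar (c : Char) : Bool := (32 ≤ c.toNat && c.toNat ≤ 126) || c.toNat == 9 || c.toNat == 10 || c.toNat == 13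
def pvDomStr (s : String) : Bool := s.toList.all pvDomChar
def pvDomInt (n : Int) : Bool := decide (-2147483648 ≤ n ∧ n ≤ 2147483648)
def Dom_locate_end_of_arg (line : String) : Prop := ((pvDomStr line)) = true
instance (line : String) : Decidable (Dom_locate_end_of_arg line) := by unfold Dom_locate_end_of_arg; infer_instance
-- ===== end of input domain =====

-- B replaces A's indexed scan-with-break by a find-first-closing-brace then rfind-opening-brace decomposition (C-level str.find/str.rfind; measured faster in a timing run).


-- ===== PORT A =====
-- A's for-loop over indices: structural recursion over the characters with an index
-- counter; 'break' on '}' becomes returning immediately.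
def pvLoopA (cs : List Char) (i : Int) (start fin : Option Int) : Option Int × Option Int :=
  match cs with
  | [] => (start, fin)
  | c :: rest =>
    let start' := if c = '{' then some i else start
    if c = '}' then (start', some i)
    else pvLoopA rest (i + 1) start' fin

def locate_end_of_arg (line : String) : Option Int × Option Int :=
  pvLoopA line.toList 0 none none

-- ===== PORT B =====
-- line.find('}') / line.rfind('{', 0, end): first/last index of a char, with the
-- Python -1 sentinel rendered as Option (none = -1); rfind over line[0:end] is the
-- scan over the prefix of length end.
def pvFindCh (cs : List Char) (c : Char) (i : Int) : Option Int :=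
  match cs with
  | [] => none
  | x :: rest => if x = c then some i else pvFindCh rest c (i + 1)

def pvRFindCh (cs : List Char) (c : Char) (i : Int) : Option Int :=
  match cs with
  | [] => none
  | x :: rest =>
    match pvRFindCh rest c (i + 1) with
    | some j => some j
    | none => if x = c then some i else none

def locate_end_of_arg_alt (line : String) : Option Int × Option Int :=
  match pvFindCh line.toList '}' 0 with
  | none => (pvRFindCh line.toList '{' 0, none)
  | some e => (pvRFindCh (line.toList.take e.toNat) '{' 0, some e)

-- ===== PRECONDITION & SPEC =====
def Spec_locate_end_of_arg (line : String) (out : Option Int × Option Int) : Prop := out = locate_end_of_arg_alt line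
instance (line : String) (out : Option Int × Option Int) : Decidable (Spec_locate_end_of_arg line out) := by unfold Spec_locate_end_of_arg; infer_instance

-- ===== CLAIM (what is proved, stated in full; the proofs are below) =====
def Claim_equal_locate_end_of_arg : Prop := ∀ (line : String), Dom_locate_end_of_arg line → Spec_locate_end_of_arg line (locate_end_of_arg line)

-- ===== LEMMAS AND PROOFS =====
def pvOrD (o s : Option Int) : Option Int :=
  match o with
  | some x => some x
  | none => s

theorem pvFindCh_ge (cs : List Char) (c : Char) (i j : Int)
    (h : pvFindCh cs c i = some j) : i ≤ j := by
  induction cs generalizing i with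
  | nil => simp [pvFindCh] at h
  | cons x rest ih =>
    simp only [pvFindCh] at h
    split at h
    · simp at h; omega
    · have := ih (i + 1) h; omega

theorem pvOrD_orD (o s t : Option Int) : pvOrD (pvOrD o s) t = pvOrD o (pvOrD s t) := by
  cases o <;> simp [pvOrD]

theorem pvLoopA_eq (cs : List Char) (i : Int) (s : Option Int) :
    pvLoopA cs i s none =
      match pvFindCh cs '}' i with
      | none => (pvOrD (pvRFindCh cs '{' i) s, none)
      | some j => (pvOrD (pvRFindCh (cs.take (j - i).toNat) '{' i) s, some j) := by
  induction cs generalizing i s with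
  | nil => simp [pvLoopA, pvFindCh, pvRFindCh, pvOrD]
  | cons x rest ih =>
    by_cases hx : x = '}'
    · subst hx
      have hne : ('}' : Char) ≠ '{' := by decide
      simp [pvLoopA, pvFindCh, pvRFindCh, pvOrD, hne]
    · have hstep : pvLoopA (x :: rest) i s none
          = pvLoopA rest (i + 1) (if x = '{' then some i else s) none := by
        simp [pvLoopA, hx]
      rw [hstep, ih]
      cases hf : pvFindCh rest '}' (i + 1) with
      | none =>
        have hfc : pvFindCh (x :: rest) '}' i = none := by simp [pvFindCh, hx, hf]
        have hrf : pvRFindCh (x :: rest) '{' i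
            = pvOrD (pvRFindCh rest '{' (i + 1)) (if x = '{' then some i else none) := by
          rfl
        simp only [hfc, hrf, pvOrD_orD]
        by_cases hb : x = '{' <;> simp [hb, pvOrD]
      | some j =>
        have hij : i + 1 ≤ j := pvFindCh_ge rest '}' (i + 1) j hf
        have hfc : pvFindCh (x :: rest) '}' i = some j := by simp [pvFindCh, hx, hf]
        have htake : ((x :: rest).take (j - i).toNat) = x :: rest.take (j - (i + 1)).toNat := by
          have h1 : (j - i).toNat = (j - (i + 1)).toNat + 1 := by omega
          rw [h1]; rfl
        have hrt : pvRFindCh (x :: rest.take (j - (i + 1)).toNat) '{' i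
            = pvOrD (pvRFindCh (rest.take (j - (i + 1)).toNat) '{' (i + 1))
                (if x = '{' then some i else none) := by
          rfl
        simp only [hfc, htake, hrt, pvOrD_orD]
        by_cases hb : x = '{' <;> simp [hb, pvOrD]

-- ===== VERDICT (by name: the statement is the Claim_ definition above) =====
theorem locate_end_of_arg_spec : Claim_equal_locate_end_of_arg := by
  intro line _
  show locate_end_of_arg line = locate_end_of_arg_alt line
  unfold locate_end_of_arg locate_end_of_arg_alt
  rw [pvLoopA_eq]
  cases hf : pvFindCh line.toList '}' 0 with
  | none => cases pvRFindCh line.toList '{' 0 <;> simp [pvOrD]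
  | some j =>
    simp only [sub_zero]
    cases pvRFindCh (line.toList.take j.toNat) '{' 0 <;> simp [pvOrD]
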